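-- pv_equiv track=rewrite | github.com/caxulex/TimeTracker | backend/app/utils/sanitize.py | sanitize_html
-- ===== SOURCE A (Python) =====
-- def sanitize_html(text: str) -> str:
--     """
--     Escape HTML special characters to prevent XSS.
--
--     Args:
--         text: Raw text that might contain HTML
--
--     Returns:
--         HTML-escaped text
--     """
--     if not text:
--         return ""
--
--     escapes = {
--         '&': '&amp;',
--         '<': '&lt;',
--         '>': '&gt;',
--         '"': '&quot;',
--         "'": '&#x27;',
--     }
--
--     result = text
--     for char, escape in escapes.items():
--         result = result.replace(char, escape)
--
--     return result
-- ===== SOURCE B (Python) =====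
-- def sanitize_html(text: str) -> str:
--     """
--     Escape HTML special characters to prevent XSS.
--
--     Single pass: map each character to its escape (or itself) and join once,
--     instead of five full-string replace scans.
--     """
--     if not text:
--         return ""
--
--     def esc(c):
--         if c == '&':
--             return '&amp;'
--         if c == '<':
--             return '&lt;'
--         if c == '>':
--             return '&gt;'
--         if c == '"':
--             return '&quot;'
--         if c == "'":
--             return '&#x27;'
--         return c
--
--     return ''.join(esc(c) for c in text)
-- ===== Notes on version B (the rewrite author's own statement) =====
-- stated objective: simpler
-- what changed: Replaces A's five sequential full-string .replace passes with one pass over the characters, mapping each to its escape and joining once.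
import Mathlib
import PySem

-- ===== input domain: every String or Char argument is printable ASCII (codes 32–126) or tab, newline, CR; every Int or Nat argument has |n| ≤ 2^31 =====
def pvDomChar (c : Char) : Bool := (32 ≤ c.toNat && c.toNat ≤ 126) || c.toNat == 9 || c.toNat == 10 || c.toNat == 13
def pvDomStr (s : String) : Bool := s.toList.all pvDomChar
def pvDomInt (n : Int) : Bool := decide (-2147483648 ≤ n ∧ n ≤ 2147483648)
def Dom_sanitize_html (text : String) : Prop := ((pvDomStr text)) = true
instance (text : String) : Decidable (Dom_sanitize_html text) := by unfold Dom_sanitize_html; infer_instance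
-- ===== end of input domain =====

-- B: one pass over the characters (escape each, join once) instead of A's five sequential full-string replace passes; same result.

-- ===== PORT A =====
-- the `escapes` dict literal of A
def pvEscapesA : PySem.Dict String String :=
  PySem.Dict.ofList [("&", "&amp;"), ("<", "&lt;"), (">", "&gt;"), ("\"", "&quot;"), ("'", "&#x27;")]

def sanitize_html (text : String) : String :=
  if text = "" then ""
  else
    -- for char, escape in escapes.items(): result = result.replace(char, escape)
    (pvEscapesA.items).foldl (fun result ce => PySem.Str.replace result ce.1 ce.2) text

-- ===== PORT B =====
-- the inner `esc` helper of B
def pvEscChar (c : Char) : String :=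
  if c = '&' then "&amp;"
  else if c = '<' then "&lt;"
  else if c = '>' then "&gt;"
  else if c = '"' then "&quot;"
  else if c = '\'' then "&#x27;"
  else String.singleton c

def sanitize_html_alt (text : String) : String :=
  if text = "" then ""
  else PySem.Str.join "" (text.toList.map pvEscChar)

-- ===== PRECONDITION & SPEC =====
def Spec_sanitize_html (text : String) (out : String) : Prop := out = sanitize_html_alt text
instance (text : String) (out : String) : Decidable (Spec_sanitize_html text out) := by unfold Spec_sanitize_html; infer_instance

-- ===== CLAIM (what is proved, stated in full; the proofs are below) =====
def Claim_equal_sanitize_html : Prop := ∀ (text : String), Dom_sanitize_html text → Spec_sanitize_html text (sanitize_html text)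

-- ===== LEMMAS AND PROOFS =====

-- replacing a single-character pattern is a flatMap over the characters
theorem pvGoSingle (a : Char) (w : List Char) :
    ∀ (l : List Char) (fuel : Nat) (acc : List Char), l.length ≤ fuel →
    PySem.Chars.replace.go [a] w fuel l acc
      = acc.reverse ++ l.flatMap (fun c => if c = a then w else [c]) := by
  intro l
  induction l with
  | nil =>
      intro fuel acc _
      cases fuel <;> simp [PySem.Chars.replace.go]
  | cons c t ih =>
      intro fuel acc h
      cases fuel with
      | zero => simp at h
      | succ f =>
          by_cases hc : c = a
          · subst hc
            simp [PySem.Chars.replace.go, List.isPrefixOf, ih f _ (by simpa using h)]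
          · have hpre : List.isPrefixOf [a] (c :: t) = false := by
              simp [List.isPrefixOf]
              exact fun h' => (hc h'.symm).elim
            simp [PySem.Chars.replace.go, hpre, ih f _ (by simpa using h), hc]

theorem pvReplaceSingle (a : Char) (w l : List Char) :
    PySem.Chars.replace l [a] w = l.flatMap (fun c => if c = a then w else [c]) := by
  rw [PySem.Chars.replace]
  simp [pvGoSingle a w l l.length [] le_rfl]

-- the five-fold composition of single-char replacements, on lists of chars
def pvFive (l : List Char) : List Char :=
  ((((l.flatMap (fun c => if c = '&' then "&amp;".toList else [c])).flatMap
      (fun c => if c = '<' then "&lt;".toList else [c])).flatMap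
      (fun c => if c = '>' then "&gt;".toList else [c])).flatMap
      (fun c => if c = '"' then "&quot;".toList else [c])).flatMap
      (fun c => if c = '\'' then "&#x27;".toList else [c])

theorem pvFive_append (x y : List Char) : pvFive (x ++ y) = pvFive x ++ pvFive y := by
  simp [pvFive]

theorem pvFive_single (c : Char) : pvFive [c] = (pvEscChar c).toList := by
  by_cases h1 : c = '&'; · subst h1; decide
  by_cases h2 : c = '<'; · subst h2; decide
  by_cases h3 : c = '>'; · subst h3; decide
  by_cases h4 : c = '"'; · subst h4; decide
  by_cases h5 : c = '\''; · subst h5; decide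
  simp [pvFive, pvEscChar, h1, h2, h3, h4, h5, String.singleton]

theorem pvFive_eq_flatMap (l : List Char) :
    pvFive l = l.flatMap (fun c => (pvEscChar c).toList) := by
  induction l with
  | nil => simp [pvFive]
  | cons c t ih =>
      have : (c :: t) = [c] ++ t := rfl
      rw [this, pvFive_append, ih, pvFive_single]
      simp

theorem pvIntercalateNil (ls : List (List Char)) : [].intercalate ls = ls.flatten := by
  induction ls with
  | nil => simp [List.intercalate]
  | cons h t ih => cases t <;> simp_all [List.intercalate, List.intersperse]

theorem pvAltToList (l : List Char) :
    (PySem.Str.join "" (l.map pvEscChar)).toList = l.flatMap (fun c => (pvEscChar c).toList) := by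
  simp [PySem.Str.toList_join, PySem.Chars.join, pvIntercalateNil, List.flatten_eq_flatMap,
        List.flatMap_map, Function.comp]

-- ===== VERDICT (by name: the statement is the Claim_ definition above) =====
theorem sanitize_html_spec : Claim_equal_sanitize_html := by
  intro text _
  unfold Spec_sanitize_html sanitize_html sanitize_html_alt
  by_cases h : text = ""
  · simp [h]
  · simp only [h, if_false]
    apply String.toList_inj.mp
    have hitems : pvEscapesA.items
        = [("&", "&amp;"), ("<", "&lt;"), (">", "&gt;"), ("\"", "&quot;"), ("'", "&#x27;")] := rfl
    rw [hitems]
    simp only [List.foldl]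
    rw [pvAltToList]
    rw [← pvFive_eq_flatMap]
    simp only [PySem.Str.replace]
    simp [pvReplaceSingle, pvFive, String.toList_ofList]
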